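-- pv_equiv track=rewrite | github.com/matuspintek-boop/ib111 | 02/p1_digit_sum.py | power_digit_sum
-- ===== SOURCE A (Python) =====
-- def power_digit_sum(number):
--     # declaring vbariables
--     sum_ = 0
--     i = 0
--     number_ = number
--
--     # needed length of num in 7 set
--     while number > 0:
--         current = number % 7
--         i += 1
--         number //= 7
--
--     # increasing sum
--     while number_ > 0:
--         current = number_ % 7
--         if current > 0:
--             sum_ += (current ** i)
--         i -= 1
--         number_ //= 7
--
--     return sum_
-- ===== SOURCE B (Python) =====
-- def power_digit_sum(number):
--     total = 0
--     if number > 0: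
--         p = 1
--         while p * 7 <= number:
--             p *= 7
--         e = 1
--         while p >= 1:
--             d = number // p
--             total += d ** e
--             number -= d * p
--             p //= 7
--             e += 1
--     return total
-- ===== Notes on version B (the rewrite author's own statement) =====
-- stated objective: alternative
-- what changed: B extracts digits most-significant-first by dividing by descending powers of 7 (built up once by a multiplication loop) and subtracting, with exponents ascending from 1, instead of A's two least-significant-first %7-and-//7 loops that first count digits and then apply descending exponents.
import Mathlib
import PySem

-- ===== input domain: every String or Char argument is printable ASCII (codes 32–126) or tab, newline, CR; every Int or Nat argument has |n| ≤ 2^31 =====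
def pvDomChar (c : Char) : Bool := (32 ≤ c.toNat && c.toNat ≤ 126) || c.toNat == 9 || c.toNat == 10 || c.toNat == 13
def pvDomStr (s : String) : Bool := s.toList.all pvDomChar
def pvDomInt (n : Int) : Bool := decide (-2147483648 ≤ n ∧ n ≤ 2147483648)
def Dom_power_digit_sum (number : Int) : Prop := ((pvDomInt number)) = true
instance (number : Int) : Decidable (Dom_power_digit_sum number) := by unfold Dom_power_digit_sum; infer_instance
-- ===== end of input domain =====

-- B peels base-7 digits most-significant-first by descending powers of 7 with ascending
-- exponents, instead of A's two least-significant-first %7//7 loops. Objective: alternative.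

-- ===== PORT A =====
-- termination helper for the while loops: number //= 7 shrinks a positive number
theorem pv_floordiv7_lt (n : Int) (h : n > 0) :
    (PySem.Int.floordiv n 7).toNat < n.toNat := by
  rw [PySem.Int.floordiv_eq_ediv_of_pos (by omega)]
  omega

-- first while loop of A: counts the base-7 digits into i
def pdsLen (number : Int) (i : Int) : Int :=
  if h : number > 0 then pdsLen (PySem.Int.floordiv number 7) (i + 1) else i
termination_by number.toNat
decreasing_by exact pv_floordiv7_lt number h

-- second while loop of A: adds current ** i for each nonzero digit, decrementing i
def pdsSum (number_ : Int) (i : Int) (sum_ : Int) : Int :=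
  if h : number_ > 0 then
    let current := PySem.Int.mod number_ 7
    pdsSum (PySem.Int.floordiv number_ 7) (i - 1)
      (if current > 0 then sum_ + current ^ i.toNat else sum_)
  else sum_
termination_by number_.toNat
decreasing_by exact pv_floordiv7_lt number_ h

def power_digit_sum (number : Int) : Int :=
  pdsSum number (pdsLen number 0) 0

-- ===== PORT B =====
-- first while loop of B: grows p by factors of 7 while p*7 <= number
def findPow (number p : Int) (hp : 0 < p) : Int :=
  if h : p * 7 ≤ number then findPow number (p * 7) (by omega) else p
termination_by (number - p).toNat
decreasing_by omega

-- second while loop of B: peels the top digit d = number // p, adds d ** e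
def peel (number p e total : Int) : Int :=
  if h : p ≥ 1 then
    let d := PySem.Int.floordiv number p
    peel (number - d * p) (PySem.Int.floordiv p 7) (e + 1) (total + d ^ e.toNat)
  else total
termination_by p.toNat
decreasing_by
  rw [PySem.Int.floordiv_eq_ediv_of_pos (by omega)]
  omega

def power_digit_sum_alt (number : Int) : Int :=
  if number > 0 then peel number (findPow number 1 (by norm_num)) 1 0 else 0

-- ===== PRECONDITION & SPEC =====
def Spec_power_digit_sum (number : Int) (out : Int) : Prop := out = power_digit_sum_alt number
instance (number : Int) (out : Int) : Decidable (Spec_power_digit_sum number out) := by unfold Spec_power_digit_sum; infer_instance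

-- ===== CLAIM (what is proved, stated in full; the proofs are below) =====
def Claim_equal_power_digit_sum : Prop := ∀ (number : Int), Dom_power_digit_sum number → Spec_power_digit_sum number (power_digit_sum number)

-- ===== LEMMAS AND PROOFS =====

-- the base-7 digits, least significant first (proof-side description of both loops)
def digits7 (number : Int) : List Int :=
  if h : number > 0 then
    PySem.Int.mod number 7 :: digits7 (PySem.Int.floordiv number 7)
  else []
termination_by number.toNat
decreasing_by exact pv_floordiv7_lt number h

-- LSB-first power sum of a digit list: head gets exponent length, tail one less
def altSum : List Int → Int
  | [] => 0
  | d :: t => d ^ (t.length + 1) + altSum t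

-- MSB-first power sum with ascending exponent starting at e
def msum : List Int → Nat → Int
  | [], _ => 0
  | d :: t, e => d ^ e + msum t (e + 1)

-- exactly L digits, least significant first, with leading zeros
def digitsPad : Nat → Int → List Int
  | 0, _ => []
  | L + 1, n => n % 7 :: digitsPad L (n / 7)

theorem pdsLen_eq (number i : Int) :
    pdsLen number i = i + (digits7 number).length := by
  fun_induction pdsLen number i with
  | case1 n i h ih =>
      rw [digits7, dif_pos h]
      simp only [List.length_cons, ih]
      push_cast
      ring
  | case2 n i h =>
      rw [digits7, dif_neg h]
      simp

theorem pdsSum_eq (number : Int) : ∀ (s : Int),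
    pdsSum number ((digits7 number).length : Int) s = s + altSum (digits7 number) := by
  induction hm : number.toNat using Nat.strong_induction_on generalizing number with
  | _ m ih =>
    intro s
    by_cases h : number > 0
    · have hrec := ih (PySem.Int.floordiv number 7).toNat
        (hm ▸ pv_floordiv7_lt number h) (PySem.Int.floordiv number 7) rfl
      rw [digits7, dif_pos h]
      rw [pdsSum, dif_pos h]
      have hmod0 : 0 ≤ PySem.Int.mod number 7 := by
        have := PySem.Int.mod_eq_emod_of_pos (a := number) (b := 7) (by omega)
        omega
      simp only [List.length_cons, altSum]
      have hi : ((((digits7 (PySem.Int.floordiv number 7)).length + 1 : Nat) : Int) - 1)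
          = ((digits7 (PySem.Int.floordiv number 7)).length : Int) := by push_cast; ring
      rw [hi, hrec]
      by_cases hc : PySem.Int.mod number 7 > 0
      · rw [if_pos hc]
        have : (((digits7 (PySem.Int.floordiv number 7)).length + 1 : Nat) : Int).toNat
            = (digits7 (PySem.Int.floordiv number 7)).length + 1 := by omega
        rw [this]; ring
      · have hz : PySem.Int.mod number 7 = 0 := by omega
        rw [if_neg hc, hz]
        simp
    · rw [digits7, dif_neg h]
      rw [pdsSum, dif_neg h]
      simp [altSum]

-- A's whole value is the LSB-first power sum of the digit list
theorem power_digit_sum_eq (number : Int) :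
    power_digit_sum number = altSum (digits7 number) := by
  unfold power_digit_sum
  rw [pdsLen_eq, zero_add, pdsSum_eq, zero_add]

theorem msum_append (xs : List Int) (d : Int) : ∀ (e : Nat),
    msum (xs ++ [d]) e = msum xs e + d ^ (e + xs.length) := by
  induction xs with
  | nil => intro e; simp [msum]
  | cons x t ih =>
      intro e
      simp only [List.cons_append, msum, ih (e + 1), List.length_cons]
      ring_nf

theorem altSum_eq_msum_reverse (ds : List Int) : altSum ds = msum ds.reverse 1 := by
  induction ds with
  | nil => rfl
  | cons d t ih =>
      simp only [altSum, List.reverse_cons, msum_append, ih]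
      have : 1 + t.reverse.length = t.length + 1 := by simp [Nat.add_comm]
      rw [this]; ring

-- splitting off the most significant slot of a padded digit list
theorem digitsPad_split : ∀ (k : Nat) (n : Int), 0 ≤ n → n < 7 ^ (k + 1) →
    digitsPad (k + 1) n = digitsPad k (n % 7 ^ k) ++ [n / 7 ^ k] := by
  intro k
  induction k with
  | zero =>
      intro n h0 h7
      have h7' : n < 7 := by simpa using h7
      simp [digitsPad, Int.emod_eq_of_lt h0 h7']
  | succ k ih =>
      intro n h0 h7
      have hd0 : 0 ≤ n / 7 := Int.ediv_nonneg h0 (by norm_num)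
      have hd7 : n / 7 < 7 ^ (k + 1) := by
        rw [Int.ediv_lt_iff_lt_mul (by norm_num)]
        calc n < 7 ^ (k + 1 + 1) := h7
        _ = 7 ^ (k + 1) * 7 := by ring
      have e1 : n % 7 ^ (k + 1) % 7 = n % 7 :=
        Int.emod_emod_of_dvd n (dvd_pow_self 7 (Nat.succ_ne_zero k))
      have e3 : n / 7 ^ (k + 1) = n / 7 / 7 ^ k := by
        rw [show (7:Int) ^ (k + 1) = 7 * 7 ^ k from pow_succ' 7 k,
          ← Int.ediv_ediv_of_nonneg (by norm_num : (0:Int) ≤ 7)]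
      have e2 : n % 7 ^ (k + 1) / 7 = n / 7 % 7 ^ k := by
        rw [Int.emod_def, e3]
        have hr : n - 7 ^ (k + 1) * (n / 7 / 7 ^ k)
            = n + (-(7 ^ k * (n / 7 / 7 ^ k))) * 7 := by ring
        rw [hr, Int.add_mul_ediv_right _ _ (by norm_num : (7:Int) ≠ 0), Int.emod_def]
        ring
      calc digitsPad (k + 1 + 1) n = n % 7 :: digitsPad (k + 1) (n / 7) := rfl
        _ = n % 7 :: (digitsPad k (n / 7 % 7 ^ k) ++ [n / 7 / 7 ^ k]) := by
            rw [ih (n / 7) hd0 hd7]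
        _ = (n % 7 ^ (k + 1) % 7 :: digitsPad k (n % 7 ^ (k + 1) / 7)) ++ [n / 7 ^ (k + 1)] := by
            rw [e1, e2, e3]; rfl
        _ = digitsPad (k + 1) (n % 7 ^ (k + 1)) ++ [n / 7 ^ (k + 1)] := rfl

-- on numbers with exactly k+1 base-7 digits, the padded list is the real digit list
theorem digitsPad_eq_digits7 : ∀ (k : Nat) (n : Int), 7 ^ k ≤ n → n < 7 ^ (k + 1) →
    digitsPad (k + 1) n = digits7 n := by
  intro k
  induction k with
  | zero =>
      intro n h1 h7
      simp only [pow_zero] at h1 h7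
      rw [digits7, dif_pos (by omega), digits7,
        PySem.Int.floordiv_eq_ediv_of_pos (by norm_num),
        PySem.Int.mod_eq_emod_of_pos (by norm_num)]
      have : n / 7 = 0 := Int.ediv_eq_zero_of_lt (by omega) h7
      rw [dif_neg (by omega)]
      rfl
  | succ k ih =>
      intro n h1 h7
      have hpos : n > 0 := lt_of_lt_of_le (by positivity) h1
      rw [digits7, dif_pos hpos,
        PySem.Int.floordiv_eq_ediv_of_pos (by norm_num),
        PySem.Int.mod_eq_emod_of_pos (by norm_num)]
      rw [show digitsPad (k + 1 + 1) n = n % 7 :: digitsPad (k + 1) (n / 7) from rfl,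
        ih (n / 7) ?_ ?_]
      · rw [Int.le_ediv_iff_mul_le (by norm_num)]
        calc (7:Int) ^ k * 7 = 7 ^ (k + 1) := by ring
        _ ≤ n := h1
      · rw [Int.ediv_lt_iff_lt_mul (by norm_num)]
        calc n < 7 ^ (k + 1 + 1) := h7
        _ = 7 ^ (k + 1) * 7 := by ring

-- B's peel loop computes the MSB-first power sum of the k+1 padded digits
theorem peel_eq : ∀ (k : Nat) (n e total : Int), 0 ≤ n → n < 7 ^ (k + 1) → 1 ≤ e →
    peel n (7 ^ k) e total = total + msum ((digitsPad (k + 1) n).reverse) e.toNat := by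
  intro k
  induction k with
  | zero =>
      intro n e total h0 h7 he
      rw [peel, dif_pos (by norm_num)]
      simp only [pow_zero] at *
      rw [PySem.Int.floordiv_eq_ediv_of_pos (a := n) (by norm_num), Int.ediv_one]
      rw [peel]
      rw [dif_neg (by
        rw [PySem.Int.floordiv_eq_ediv_of_pos (by norm_num)]
        norm_num)]
      simp only [digitsPad, List.reverse_cons, List.reverse_nil, List.nil_append, msum]
      rw [Int.emod_eq_of_lt h0 (show n < 7 by simpa using h7)]
      ring
  | succ k ih =>
      intro n e total h0 h7 he
      have hp : (0:Int) < 7 ^ (k + 1) := by positivity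
      rw [peel, dif_pos (by omega)]
      rw [PySem.Int.floordiv_eq_ediv_of_pos (a := n) hp,
        PySem.Int.floordiv_eq_ediv_of_pos (a := (7:Int) ^ (k + 1)) (by norm_num)]
      have hstep : (7:Int) ^ (k + 1) / 7 = 7 ^ k := by
        rw [pow_succ, Int.mul_ediv_cancel _ (by norm_num)]
      have hsub : n - n / 7 ^ (k + 1) * 7 ^ (k + 1) = n % 7 ^ (k + 1) := by
        rw [Int.emod_def]; ring
      rw [hstep]
      show peel (n - n / 7 ^ (k + 1) * 7 ^ (k + 1)) (7 ^ k) (e + 1)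
          (total + (n / 7 ^ (k + 1)) ^ e.toNat)
        = total + msum (digitsPad (k + 1 + 1) n).reverse e.toNat
      rw [hsub,
        ih (n % 7 ^ (k + 1)) (e + 1) _ (Int.emod_nonneg n (by positivity))
          (Int.emod_lt_of_pos n hp) (by omega)]
      rw [digitsPad_split (k + 1) n h0 h7]
      simp only [List.reverse_append, List.reverse_cons, List.reverse_nil,
        List.nil_append, List.cons_append, msum]
      have : (e + 1).toNat = e.toNat + 1 := by omega
      rw [this]
      ring

-- B's first loop finds the largest power of 7 that fits
theorem findPow_spec (number p : Int) (hp : 0 < p) : p ≤ number →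
    ∃ k : Nat, findPow number p hp = p * 7 ^ k ∧ p * 7 ^ k ≤ number ∧ number < p * 7 ^ (k + 1) := by
  fun_induction findPow number p hp
  case case1 =>
    rename_i p hp h ih
    intro _
    obtain ⟨k, hk, h1, h2⟩ := ih h
    refine ⟨k + 1, by rw [hk]; ring, ?_, ?_⟩
    · calc p * 7 ^ (k + 1) = p * 7 * 7 ^ k := by ring
        _ ≤ number := h1
    · calc number < p * 7 * 7 ^ (k + 1) := h2
        _ = p * 7 ^ (k + 1 + 1) := by ring
  case case2 =>
    rename_i p hp h
    intro hle
    exact ⟨0, by ring, by simpa using hle, by simpa using not_le.mp h⟩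

theorem power_digit_sum_alt_eq (number : Int) :
    power_digit_sum_alt number = altSum (digits7 number) := by
  unfold power_digit_sum_alt
  by_cases h : number > 0
  · rw [if_pos h]
    obtain ⟨k, hk, h1, h2⟩ := findPow_spec number 1 (by norm_num) (by omega)
    rw [one_mul] at h1 h2
    rw [hk, one_mul, peel_eq k number 1 0 (by omega) h2 (by norm_num)]
    rw [digitsPad_eq_digits7 k number h1 h2]
    have : (1:Int).toNat = 1 := rfl
    rw [this, zero_add, ← altSum_eq_msum_reverse]
  · rw [if_neg h, digits7, dif_neg h]
    rfl

-- ===== VERDICT (by name: the statement is the Claim_ definition above) =====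
theorem power_digit_sum_spec : Claim_equal_power_digit_sum := by
  intro number _
  unfold Spec_power_digit_sum
  rw [power_digit_sum_eq, power_digit_sum_alt_eq]
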